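-- pv_equiv track=rewrite | github.com/amohooo/DISCRETE-STRUCTURE-Graph | project.py | gameReferees
-- ===== SOURCE A (Python) =====
-- def gameReferees(gamePotentialReferees):
--     def assign_referee(game_idx, used_referees, assigned_referees):
--         if game_idx == len(gamePotentialReferees):
--             return True
--
--         game = list(gamePotentialReferees.keys())[game_idx]
--         potential_referees = gamePotentialReferees[game]
--
--         for referee in potential_referees:
--             if referee not in used_referees:
--                 assigned_referees[game] = referee
--                 used_referees.add(referee)
--                 if assign_referee(game_idx + 1, used_referees, assigned_referees):
--                     return True
--                 used_referees.remove(referee)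
--                 del assigned_referees[game]
--
--         return False
--
--     assigned_referees = {}
--     used_referees = set()
--
--     if assign_referee(0, used_referees, assigned_referees):
--         return assigned_referees
--     else:
--         return None
-- ===== SOURCE B (Python) =====
-- def gameReferees(gamePotentialReferees):
--     def solve(games, used):
--         if not games:
--             return []
--         (game, refs) = games[0]
--         rest = games[1:]
--         for r in refs:
--             if r not in used:
--                 tail = solve(rest, used | {r})
--                 if tail is not None:
--                     return [(game, r)] + tail
--         return None
--
--     result = solve(list(gamePotentialReferees.items()), frozenset())
--     return None if result is None else dict(result)
-- ===== Notes on version B (the rewrite author's own statement) =====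
-- stated objective: simpler
-- what changed: Replaces index-based recursion over a shared mutable set/dict (with keys() rebuilt at every node and explicit undo on backtrack) by structural recursion over the item list with a persistent frozenset, building the result list on return; no mutation or undo.
import Mathlib
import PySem

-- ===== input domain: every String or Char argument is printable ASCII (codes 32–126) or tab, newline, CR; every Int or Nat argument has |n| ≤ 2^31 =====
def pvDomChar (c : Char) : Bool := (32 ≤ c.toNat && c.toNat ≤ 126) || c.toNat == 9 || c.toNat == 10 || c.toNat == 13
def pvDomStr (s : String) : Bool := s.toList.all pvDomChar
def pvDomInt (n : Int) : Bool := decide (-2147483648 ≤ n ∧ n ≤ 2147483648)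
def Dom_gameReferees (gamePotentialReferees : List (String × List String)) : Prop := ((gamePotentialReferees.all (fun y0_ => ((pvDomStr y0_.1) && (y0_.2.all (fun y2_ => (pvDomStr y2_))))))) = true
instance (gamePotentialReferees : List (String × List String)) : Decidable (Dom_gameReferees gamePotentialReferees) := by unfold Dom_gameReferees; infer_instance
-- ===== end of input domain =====

-- B replaces A's index recursion over a shared mutable set/dict (with undo on backtrack) by
-- structural recursion over the item list with a persistent set, building the result on return.

-- ===== PORT A =====
-- assign_referee(game_idx, used_referees, assigned_referees): the Python mutates `used`/`assigned`
-- and undoes the mutation on failure, so the functional port passes the extended state into the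
-- recursive call and keeps the old state when that call fails.  The for-loop returning on the
-- first success is List.findSome?.  `fuel` is a termination guard only: every call has
-- fuel = size - game_idx, so the fuel-0 branch is unreachable (game_idx = size is caught first).
def pvGoA (d : PySem.Dict String (List String)) (fuel : Nat) (game_idx : Nat)
    (used : PySem.Set String) (assigned : PySem.Dict String String) :
    Option (PySem.Dict String String) :=
  if game_idx = d.size then some assigned
  else
    match fuel with
    | 0 => none
    | fuel' + 1 =>
      let game := d.keys.getD game_idx ""      -- list(d.keys())[game_idx], index always in range
      let refs := d.getD game []               -- d[game], the key is always present
      refs.findSome? (fun referee =>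
        if PySem.Set.contains used referee then none
        else pvGoA d fuel' (game_idx + 1) (PySem.Set.add used referee)
               (assigned.insert game referee))

def gameReferees (gamePotentialReferees : List (String × List String)) : Option (List (String × String)) :=
  let d := PySem.Dict.ofList gamePotentialReferees
  (pvGoA d d.size 0 PySem.Set.empty PySem.Dict.empty).map (fun a => a.items)

-- ===== PORT B =====
-- solve(games, used): structural recursion on the remaining (game, refs) items; persistent set;
-- the successful tail is extended by cons on return.
def pvSolveB : List (String × List String) → PySem.Set String → Option (List (String × String))
  | [], _ => some []
  | (game, refs) :: rest, used =>
      refs.findSome? (fun r =>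
        if PySem.Set.contains used r then none
        else (pvSolveB rest (PySem.Set.add used r)).map (fun tail => (game, r) :: tail))

def gameReferees_alt (gamePotentialReferees : List (String × List String)) : Option (List (String × String)) :=
  pvSolveB (PySem.Dict.ofList gamePotentialReferees).items PySem.Set.empty

-- ===== PRECONDITION & SPEC =====
def Spec_gameReferees (gamePotentialReferees : List (String × List String)) (out : Option (List (String × String))) : Prop := out = gameReferees_alt gamePotentialReferees
instance (gamePotentialReferees : List (String × List String)) (out : Option (List (String × String))) : Decidable (Spec_gameReferees gamePotentialReferees out) := by unfold Spec_gameReferees; infer_instance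

-- ===== CLAIM (what is proved, stated in full; the proofs are below) =====
def Claim_equal_gameReferees : Prop := ∀ (gamePotentialReferees : List (String × List String)), Dom_gameReferees gamePotentialReferees → Spec_gameReferees gamePotentialReferees (gameReferees gamePotentialReferees)

-- ===== LEMMAS AND PROOFS =====

theorem pv_map_findSome? {α β γ : Type} (f : β → γ) (g : α → Option β) (l : List α) :
    Option.map f (l.findSome? g) = l.findSome? (fun a => Option.map f (g a)) := by
  induction l with
  | nil => rfl
  | cons x xs ih =>
    simp only [List.findSome?_cons]
    cases g x <;> simp [ih]

theorem pv_findSome?_congr {α β : Type} {f g : α → Option β} (l : List α)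
    (h : ∀ a ∈ l, f a = g a) : l.findSome? f = l.findSome? g := by
  induction l with
  | nil => rfl
  | cons x xs ih =>
    rw [List.findSome?_cons, List.findSome?_cons, h x (by simp)]
    cases g x with
    | none => exact ih (fun a ha => h a (List.mem_cons_of_mem x ha))
    | some b => rfl

-- Main invariant: with fuel = size - idx, A's search from game index idx with accumulated
-- assignment `assigned` computes B's search over the remaining items, prefixed by `assigned`.
theorem pvGoA_eq_solveB (d : PySem.Dict String (List String)) (hnd : d.keys.Nodup) :
    ∀ (k idx : Nat) (used : PySem.Set String) (assigned : PySem.Dict String String),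
      idx + k = d.size →
      (∀ key ∈ (d.items.drop idx).map Prod.fst, assigned.contains key = false) →
      (pvGoA d k idx used assigned).map (fun a => a.items) =
        (pvSolveB (d.items.drop idx) used).map (fun tail => assigned.items ++ tail) := by
  intro k
  induction k with
  | zero =>
    intro idx used assigned hk _
    have hidx : idx = d.size := by omega
    subst hidx
    have hdrop : d.items.drop d.size = [] := by
      apply List.drop_eq_nil_of_le
      simp [PySem.Dict.size]
    rw [hdrop]
    simp [pvGoA, pvSolveB]
  | succ k ih =>
    intro idx used assigned hk hfresh
    have hlen : d.items.length = d.size := rfl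
    have hidx : idx < d.items.length := by omega
    have hne : ¬ (idx = d.size) := by omega
    have hdrop : d.items.drop idx = d.items[idx] :: d.items.drop (idx + 1) :=
      List.drop_eq_getElem_cons hidx
    have hkeysdef : d.keys = d.items.map Prod.fst := rfl
    have hgame : d.keys.getD idx "" = d.items[idx].1 := by
      rw [hkeysdef, List.getD_eq_getElem?_getD, List.getElem?_map,
        List.getElem?_eq_getElem hidx]
      rfl
    have hmem : (d.items[idx].1, d.items[idx].2) ∈ d.items :=
      List.getElem_mem hidx
    have hrefs : d.getD d.items[idx].1 [] = d.items[idx].2 :=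
      PySem.Dict.getD_of_mem_items d hmem hnd []
    have hgfresh : assigned.contains d.items[idx].1 = false := by
      apply hfresh
      rw [hdrop]
      rw [List.map_cons]
      exact List.mem_cons_self
    have hnotlater : ∀ key ∈ (d.items.drop (idx + 1)).map Prod.fst, key ≠ d.items[idx].1 := by
      intro key hmemk
      have hmapnd : (d.items.map Prod.fst).Nodup := by rw [← hkeysdef]; exact hnd
      have hsplit : d.items.map Prod.fst =
          (d.items.map Prod.fst).take (idx + 1) ++ (d.items.map Prod.fst).drop (idx + 1) :=
        (List.take_append_drop _ _).symm
      have hdisj := (List.nodup_append.mp (hsplit ▸ hmapnd)).2.2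
      have hkey' : key ∈ (d.items.map Prod.fst).drop (idx + 1) := by
        rw [List.map_drop] at hmemk
        exact hmemk
      have hidx' : idx < ((d.items.map Prod.fst).take (idx + 1)).length := by
        simp [List.length_take]
        omega
      have hgamein : d.items[idx].1 ∈ (d.items.map Prod.fst).take (idx + 1) := by
        have h2 : ((d.items.map Prod.fst).take (idx + 1))[idx] = d.items[idx].1 := by
          rw [List.getElem_take, List.getElem_map]
        exact h2 ▸ List.getElem_mem hidx'
      intro heq
      exact hdisj _ hgamein _ hkey' heq.symm
    rw [hdrop]
    show ((if idx = d.size then some assigned else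
      match k + 1 with
      | 0 => none
      | fuel' + 1 =>
        (d.getD (d.keys.getD idx "") []).findSome? (fun referee =>
          if PySem.Set.contains used referee then none
          else pvGoA d fuel' (idx + 1) (PySem.Set.add used referee)
                 (assigned.insert (d.keys.getD idx "") referee))).map (fun a => a.items)) = _
    rw [if_neg hne]
    simp only [hgame, hrefs, pvSolveB, pv_map_findSome?]
    apply pv_findSome?_congr
    intro r _
    by_cases hc : used.contains r = true
    · have h' : r ∈ used := by simpa using hc
      simp [h']
    · rw [if_neg hc, if_neg hc]
      have hfresh' : ∀ key ∈ (d.items.drop (idx + 1)).map Prod.fst,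
          (assigned.insert d.items[idx].1 r).contains key = false := by
        intro key hmemk
        rw [PySem.Dict.contains_insert]
        have h1 : assigned.contains key = false := by
          apply hfresh
          rw [hdrop, List.map_cons]
          exact List.mem_cons_of_mem _ hmemk
        have h2 : (key == d.items[idx].1) = false := by
          simp [hnotlater key hmemk]
        simp [h1, h2]
      rw [ih (idx + 1) (PySem.Set.add used r) (assigned.insert d.items[idx].1 r) (by omega) hfresh']
      rw [PySem.Dict.items_insert_of_not_contains assigned r hgfresh]
      cases pvSolveB (d.items.drop (idx + 1)) (PySem.Set.add used r) with
      | none => rfl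
      | some t => simp

-- ===== VERDICT (by name: the statement is the Claim_ definition above) =====
theorem gameReferees_spec : Claim_equal_gameReferees := by
  intro g _
  unfold Spec_gameReferees gameReferees gameReferees_alt
  have h := pvGoA_eq_solveB (PySem.Dict.ofList g) (PySem.Dict.nodup_keys_ofList g)
    (PySem.Dict.ofList g).size 0 PySem.Set.empty PySem.Dict.empty (by omega)
    (by intro key _; exact PySem.Dict.contains_empty key)
  simpa [PySem.Dict.empty] using h
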